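-- pv_equiv track=rewrite | github.com/david-busbib/python-project- | ex8/ex8.py | pic
-- ===== SOURCE A (Python) =====
-- def pic(lst, n, m):
--     pic1 = [[-1 for i in range(m)]for j in range(n)]
--     k = 0
--     for b in range(n):
--         for a in range(m):
--             if k < len(lst):
--                 pic1[b][a] = lst[k]
--             k += 1
--     return pic1
-- ===== SOURCE B (Python) =====
-- def pic(lst, n, m):
--     out = []
--     for b in range(n):
--         row = lst[b * m:(b + 1) * m] if m > 0 else []
--         out.append(row + [-1] * (m - len(row)))
--     return out
-- ===== Notes on version B (the rewrite author's own statement) =====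
-- stated objective: idiomatic
-- what changed: Replaces the pre-built -1 grid, the global cell counter k and the per-cell in-place assignments with a single row loop that slices each row's data out of lst in bulk and pads it with -1 up to length m.
import Mathlib
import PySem

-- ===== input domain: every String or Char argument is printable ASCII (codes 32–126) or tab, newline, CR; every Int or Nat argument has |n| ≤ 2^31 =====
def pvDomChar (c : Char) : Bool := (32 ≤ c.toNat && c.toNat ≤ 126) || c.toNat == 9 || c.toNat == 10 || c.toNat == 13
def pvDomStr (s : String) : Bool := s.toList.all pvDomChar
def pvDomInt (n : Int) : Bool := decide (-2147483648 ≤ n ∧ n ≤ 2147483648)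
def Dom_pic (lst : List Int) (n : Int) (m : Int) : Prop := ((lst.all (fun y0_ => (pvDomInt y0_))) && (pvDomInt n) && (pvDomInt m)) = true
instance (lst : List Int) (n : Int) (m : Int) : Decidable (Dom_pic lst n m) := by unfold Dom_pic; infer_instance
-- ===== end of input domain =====

-- B reshapes lst into an n×m grid by slicing each row out of lst in bulk and padding with -1,
-- instead of A's pre-built -1 grid mutated cell by cell under a global counter (idiomatic rewrite, same cost).

-- ===== PORT A =====
-- literal transliteration: build the -1 grid, then the nested b/a loops thread the state (grid, k);
-- 'pic1[b][a] = lst[k]' becomes a List.set of row b at column a (indices are in range by construction)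
def picInner (lst : List Int) (b : Int) (st : List (List Int) × Int) (a : Int) : List (List Int) × Int :=
  (if st.2 < (lst.length : Int) then
      st.1.set b.toNat ((st.1.getD b.toNat []).set a.toNat (lst.getD st.2.toNat 0))
    else st.1,
   st.2 + 1)

def picOuter (lst : List Int) (m : Int) (st : List (List Int) × Int) (b : Int) : List (List Int) × Int :=
  (PySem.List.pyRange 0 m 1).foldl (picInner lst b) st

-- 'pic1 = [[-1 for i in range(m)] for j in range(n)]'
def picInit (n : Int) (m : Int) : List (List Int) :=
  (PySem.List.pyRange 0 n 1).map (fun _ => (PySem.List.pyRange 0 m 1).map (fun _ => (-1 : Int)))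

def pic (lst : List Int) (n : Int) (m : Int) : List (List Int) :=
  ((PySem.List.pyRange 0 n 1).foldl (picOuter lst m) (picInit n m, 0)).1

-- ===== PORT B =====
def pic_alt (lst : List Int) (n : Int) (m : Int) : List (List Int) :=
  (PySem.List.pyRange 0 n 1).foldl (fun out b =>
    let row := if 0 < m then PySem.List.slice lst (some (b * m)) (some ((b + 1) * m)) else []
    out ++ [row ++ List.replicate (m - (row.length : Int)).toNat (-1)]) []

-- ===== PRECONDITION & SPEC =====
def Spec_pic (lst : List Int) (n : Int) (m : Int) (out : List (List Int)) : Prop := out = pic_alt lst n m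
instance (lst : List Int) (n : Int) (m : Int) (out : List (List Int)) : Decidable (Spec_pic lst n m out) := by unfold Spec_pic; infer_instance

-- ===== CLAIM (what is proved, stated in full; the proofs are below) =====
def Claim_equal_pic : Prop := ∀ (lst : List Int) (n : Int) (m : Int), Dom_pic lst n m → Spec_pic lst n m (pic lst n m)

-- ===== LEMMAS AND PROOFS =====

-- common normal form: row with counter start s is the m-entry row of lst[s..], -1 beyond lst
def rowSpec (lst : List Int) (M s : Nat) : List Int :=
  (List.range M).map (fun i => if s + i < lst.length then lst.getD (s + i) 0 else -1)

theorem rowSpec_eq_pad (lst : List Int) (M s : Nat) :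
    rowSpec lst M s = (lst.drop s).take M ++ List.replicate (M - ((lst.drop s).take M).length) (-1) := by
  apply List.ext_getElem
  · simp [rowSpec]
  · intro i h1 h2
    simp only [rowSpec, List.getElem_map, List.getElem_range]
    rcases Nat.lt_or_ge i ((lst.drop s).take M).length with hi | hi
    · rw [List.getElem_append_left hi]
      simp only [List.length_take, List.length_drop, lt_min_iff] at hi
      rw [if_pos (by omega)]
      simp [List.getD_eq_getElem?_getD, List.getElem?_eq_getElem (show s + i < lst.length by omega)]
    · rw [List.getElem_append_right hi]
      simp only [List.length_take, List.length_drop, min_le_iff] at hi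
      simp only [rowSpec, List.length_map, List.length_range] at h1
      rw [if_neg (by omega)]
      simp

-- B's row body equals rowSpec
theorem alt_row_eq (lst : List Int) (m : Int) (b : Nat) :
    (let row := if 0 < m then PySem.List.slice lst (some ((b : Int) * m)) (some (((b : Int) + 1) * m)) else []
     row ++ List.replicate (m - (row.length : Int)).toNat (-1)) =
    rowSpec lst m.toNat (b * m.toNat) := by
  rw [rowSpec_eq_pad]
  by_cases hm : 0 < m
  · have h1 : (b : Int) * m = ((b * m.toNat : Nat) : Int) := by
      push_cast; rw [Int.toNat_of_nonneg (by omega)]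
    have h2 : ((b : Int) + 1) * m = ((b * m.toNat : Nat) : Int) + ((m.toNat : Nat) : Int) := by
      push_cast; rw [Int.toNat_of_nonneg (by omega)]; ring
    simp only
    rw [if_pos hm, h1, h2, PySem.List.slice_natCast_add]
    have hcnt : (m - ((((lst.drop (b * m.toNat)).take m.toNat).length : Nat) : Int)).toNat
        = m.toNat - ((lst.drop (b * m.toNat)).take m.toNat).length := by
      simp only [List.length_take, List.length_drop]
      omega
    rw [hcnt]
  · have hz : m.toNat = 0 := by omega
    simp only
    rw [if_neg hm, hz]
    simp
    omega

-- the inner loop's effect on row b, written as a plain recursion threading the counter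
def rowFold (lst : List Int) (r : List Int) (k : Int) : List Int → List Int
  | [] => r
  | a :: L => rowFold lst
      (if k < (lst.length : Int) then r.set a.toNat (lst.getD k.toNat 0) else r) (k + 1) L

theorem rowFold_append (lst : List Int) (r : List Int) (k : Int) (L1 L2 : List Int) :
    rowFold lst r k (L1 ++ L2) = rowFold lst (rowFold lst r k L1) (k + L1.length) L2 := by
  induction L1 generalizing r k with
  | nil => simp [rowFold]
  | cons a L ih =>
    simp only [List.cons_append, rowFold, ih, List.length_cons]
    congr 1
    push_cast
    ring

-- the inner Python loop only touches row b of the grid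
theorem inner_foldl (lst : List Int) (b : Int) (L : List Int) :
    ∀ (g : List (List Int)) (k : Int), b.toNat < g.length →
    L.foldl (picInner lst b) (g, k)
      = (g.set b.toNat (rowFold lst (g.getD b.toNat []) k L), k + L.length) := by
  induction L with
  | nil =>
    intro g k hb
    simp [List.foldl, rowFold, List.getD_eq_getElem?_getD, List.getElem?_eq_getElem hb,
      List.set_getElem_self]
  | cons a L ih =>
    intro g k hb
    simp only [List.foldl_cons, picInner]
    by_cases hk : k < (lst.length : Int)
    · rw [if_pos hk]
      rw [ih _ _ (by simpa using hb)]
      simp only [rowFold, if_pos hk, List.length_cons]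
      rw [Prod.mk.injEq]
      refine ⟨?_, ?_⟩
      · rw [List.set_set]
        congr 2
        rw [List.getD_eq_getElem?_getD, List.getElem?_set_self (by omega)]
        simp [List.getD_eq_getElem?_getD, List.getElem?_eq_getElem hb]
      · push_cast; ring
    · rw [if_neg hk]
      rw [ih _ _ hb]
      simp only [rowFold, if_neg hk, List.length_cons]
      rw [Prod.mk.injEq]
      refine ⟨rfl, by push_cast; ring⟩

-- filling a fresh -1 row along range(m) from counter s yields rowSpec (shown for every prefix t)
theorem rowFold_range (lst : List Int) (M : Nat) (s : Nat) :
    ∀ t : Nat, t ≤ M →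
    rowFold lst (List.replicate M (-1)) ((s : Nat) : Int) (PySem.List.pyRange 0 (t : Nat) 1)
      = (List.range M).map (fun i => if i < t then (if s + i < lst.length then lst.getD (s + i) 0 else -1) else -1) := by
  intro t
  induction t with
  | zero =>
    intro _
    rw [show (((0:Nat) : Nat) : Int) = 0 by simp, PySem.List.pyRange_one_eq_nil (by omega)]
    simp only [rowFold]
    apply List.ext_getElem
    · simp
    · intro i h1 h2
      simp
  | succ t ih =>
    intro ht
    rw [show (((t+1:Nat) : Nat) : Int) = ((t : Nat) : Int) + 1 by push_cast; ring,
        PySem.List.pyRange_one_succ_right (show (0:Int) ≤ ((t : Nat) : Int) by omega),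
        rowFold_append, ih (by omega)]
    simp only [rowFold]
    rw [PySem.List.length_pyRange_one]
    have hlen : (((t : Nat) : Int) - 0).toNat = t := by omega
    rw [hlen]
    by_cases hk : ((s : Nat) : Int) + ((t : Nat) : Int) < (lst.length : Int)
    · rw [if_pos hk]
      apply List.ext_getElem
      · simp
      · intro i h1 h2
        simp only [List.length_set, List.length_map, List.length_range] at h1
        rw [List.getElem_set]
        by_cases hit : i = (((s : Nat) : Int) + ((t : Nat) : Int)).toNat - s
        · have hit' : i = t := by omega
          rw [if_pos (by omega)]
          simp only [List.getElem_map, List.getElem_range]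
          rw [if_pos (by omega), if_pos (by omega)]
          have : (((s : Nat) : Int) + ((t : Nat) : Int)).toNat = s + t := by omega
          rw [this]
          congr 2
          omega
        · rw [if_neg (by omega)]
          simp only [List.getElem_map, List.getElem_range]
          have hit' : i ≠ t := by omega
          by_cases hlt : i < t
          · rw [if_pos hlt, if_pos (show i < t + 1 by omega)]
          · rw [if_neg hlt, if_neg (show ¬ i < t + 1 by omega)]
    · rw [if_neg hk]
      apply List.ext_getElem
      · simp
      · intro i h1 h2
        simp only [List.getElem_map, List.getElem_range]
        by_cases hlt : i < t
        · rw [if_pos hlt, if_pos (show i < t + 1 by omega)]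
        · rw [if_neg hlt]
          by_cases hit : i < t + 1
          · rw [if_pos hit, if_neg (show ¬ s + i < lst.length by omega)]
          · rw [if_neg hit]

-- the whole inner loop over range(m), starting at counter s, as rowFold_range at t = m.toNat
theorem rowFold_range_full (lst : List Int) (m : Int) (s : Nat) :
    rowFold lst (List.replicate m.toNat (-1)) ((s : Nat) : Int) (PySem.List.pyRange 0 m 1)
      = rowSpec lst m.toNat (s) := by
  have hrange : PySem.List.pyRange 0 m 1 = PySem.List.pyRange 0 ((m.toNat : Nat) : Int) 1 := by
    by_cases hm : 0 < m
    · congr 1; omega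
    · rw [PySem.List.pyRange_one_eq_nil (by omega), PySem.List.pyRange_one_eq_nil (by omega)]
  rw [hrange, rowFold_range lst m.toNat s m.toNat (le_refl _)]
  apply List.ext_getElem
  · simp [rowSpec]
  · intro i h1 h2
    simp only [List.length_map, List.length_range] at h1
    simp only [rowSpec, List.getElem_map, List.getElem_range]
    rw [if_pos h1]

-- outer loop invariant: after t rows, grid = t finished rows ++ untouched -1 rows, k = t*m.toNat
theorem outer_foldl (lst : List Int) (m : Int) (N : Nat) :
    ∀ t : Nat, t ≤ N →
    (PySem.List.pyRange 0 (t : Nat) 1).foldl (picOuter lst m)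
        (List.replicate N (List.replicate m.toNat (-1)), 0)
    = ((List.range t).map (fun b => rowSpec lst m.toNat (b * m.toNat))
        ++ List.replicate (N - t) (List.replicate m.toNat (-1)), ((t * m.toNat : Nat) : Int)) := by
  intro t
  induction t with
  | zero =>
    intro _
    rw [show (((0:Nat) : Nat) : Int) = 0 by simp, PySem.List.pyRange_one_eq_nil (by omega)]
    simp
  | succ t ih =>
    intro ht
    rw [show (((t+1:Nat) : Nat) : Int) = ((t : Nat) : Int) + 1 by push_cast; ring,
        PySem.List.pyRange_one_succ_right (show (0:Int) ≤ ((t : Nat) : Int) by omega),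
        List.foldl_append, ih (by omega)]
    simp only [List.foldl_cons, List.foldl_nil, picOuter]
    have htn : ((t : Nat) : Int).toNat = t := by omega
    have hblen : ((t : Nat) : Int).toNat < ((List.range t).map (fun b => rowSpec lst m.toNat (b * m.toNat))
        ++ List.replicate (N - t) (List.replicate m.toNat (-1))).length := by
      rw [htn]
      simp only [List.length_append, List.length_map, List.length_range, List.length_replicate]
      omega
    rw [inner_foldl lst ((t : Nat) : Int) _ _ _ hblen]
    have hgetD : ((List.range t).map (fun b => rowSpec lst m.toNat (b * m.toNat))
        ++ List.replicate (N - t) (List.replicate m.toNat (-1))).getD t [] = List.replicate m.toNat (-1) := by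
      rw [List.getD_eq_getElem?_getD, List.getElem?_append_right (by simp)]
      simp only [List.length_map, List.length_range, Nat.sub_self]
      have hNt : N - t = (N - (t+1)) + 1 := by omega
      rw [hNt, List.replicate_succ]
      simp
    rw [htn, hgetD, rowFold_range_full lst m (t * m.toNat)]
    rw [Prod.mk.injEq]
    refine ⟨?_, ?_⟩
    · rw [List.set_append_right _ _ (by simp)]
      simp only [List.length_map, List.length_range, Nat.sub_self]
      have hrep : (List.replicate (N - t) (List.replicate m.toNat (-1 : Int))).set 0 (rowSpec lst m.toNat (t * m.toNat))
          = rowSpec lst m.toNat (t * m.toNat) :: List.replicate (N - (t+1)) (List.replicate m.toNat (-1)) := by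
        have hNt : N - t = (N - (t+1)) + 1 := by omega
        rw [hNt, List.replicate_succ]
        simp
      rw [hrep, List.range_succ]
      simp
    · rw [PySem.List.length_pyRange_one]
      have hm0 : (m - 0).toNat = m.toNat := by omega
      rw [hm0]
      push_cast
      ring

theorem pic_eq_spec (lst : List Int) (n : Int) (m : Int) :
    pic lst n m = (List.range n.toNat).map (fun b => rowSpec lst m.toNat (b * m.toNat)) := by
  unfold pic picInit
  have hpic1 : (PySem.List.pyRange 0 n 1).map (fun _ => (PySem.List.pyRange 0 m 1).map (fun _ => (-1 : Int)))
      = List.replicate n.toNat (List.replicate m.toNat (-1)) := by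
    apply List.ext_getElem
    · simp [PySem.List.length_pyRange_one]
    · intro i h1 h2
      simp only [List.getElem_map, List.getElem_replicate]
      apply List.ext_getElem
      · simp [PySem.List.length_pyRange_one]
      · intro j _ _
        simp
  have hrange : PySem.List.pyRange 0 n 1 = PySem.List.pyRange 0 ((n.toNat : Nat) : Int) 1 := by
    by_cases hn : 0 < n
    · congr 1; omega
    · rw [PySem.List.pyRange_one_eq_nil (by omega), PySem.List.pyRange_one_eq_nil (by omega)]
  rw [hpic1, hrange, outer_foldl lst m n.toNat n.toNat (le_refl _)]
  simp

theorem pic_alt_eq_spec (lst : List Int) (n : Int) (m : Int) :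
    pic_alt lst n m = (List.range n.toNat).map (fun b => rowSpec lst m.toNat (b * m.toNat)) := by
  unfold pic_alt
  rw [PySem.List.foldl_append_singleton_eq_map, PySem.List.pyRange_one, List.map_map]
  have hlen : ((n : Int) - 0).toNat = n.toNat := by omega
  rw [hlen]
  apply List.map_congr_left
  intro b _
  simp only [Function.comp]
  rw [show (0 : Int) + (b : Int) = (b : Int) by ring]
  exact alt_row_eq lst m b

-- ===== VERDICT (by name: the statement is the Claim_ definition above) =====
theorem pic_spec : Claim_equal_pic := by
  intro lst n m _
  unfold Spec_pic
  rw [pic_eq_spec, pic_alt_eq_spec]
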